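-- pv_equiv track=rewrite | github.com/ankewlin/ModernCodingTheory | coding_final/cyclic_code/BCH15_7.py | bch_encode
-- ===== SOURCE A (Python) =====
-- def bch_encode(message):
--     # 生成多项式: g(x) = x^8 + x^7 + x^6 + x^4 + 1 (二进制:111010001)
--     g = [1, 1, 1, 0, 1, 0, 0, 0, 1]  # 系数列表，从最高次项开始
--
--     # 信息位后添加8个零
--     msg_ext = message + [0] * 8
--
--     # 多项式除法
--     for i in range(7):  # 处理7位信息位
--         if msg_ext[i] == 1:  # 如果首位为1
--             for j in range(len(g)):
--                 msg_ext[i + j] ^= g[j]  # 异或生成多项式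
--
--     # 取后8位作为校验位
--     parity = msg_ext[7:15]
--
--     # 返回码字: 信息位 + 校验位
--     return message + parity
-- ===== SOURCE B (Python) =====
-- def bch_encode(message):
--     # LFSR encoder: clock the first 7 buffer positions through an 8-cell remainder
--     # register, then fold the register into the parity window of the buffer.
--     taps = [1, 1, 0, 1, 0, 0, 0, 1]
--     ext = message + [0] * 8
--     reg = [0] * 8
--     for i in range(7):
--         feedback = ext[i] ^ reg[0]
--         reg = reg[1:] + [0]
--         if feedback == 1:
--             reg = [r ^ t for r, t in zip(reg, taps)]
--     return message + [e ^ r for e, r in zip(ext[7:15], reg)]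
-- ===== Notes on version B (the rewrite author's own statement) =====
-- stated objective: alternative
-- what changed: Replaces A's in-place polynomial long division (nested loop XOR-ing the 9 generator coefficients into the mutated buffer at each firing position) by an LFSR shift-register encoder: a constant 8-cell remainder register is shifted and XOR-ed with the feedback taps once per step and the parity is the buffer's parity window zipped with the register, with no buffer mutation; Pre_ excludes messages shorter than 7 bits that contain a 1, on which A's division can XOR past the end of the buffer and raise IndexError (whether it does depends on the feedback dynamics).
-- outside the precondition, e.g. on bch_encode([1, 0, 0, 0]): A returns [1, 0, 0, 0, 1, 1, 1, 0, 1], B returns [1, 0, 0, 0, 1, 1, 1, 0, 1]; on bch_encode([1]): A raises IndexError, B returns [1, 1, 1]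
import Mathlib
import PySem

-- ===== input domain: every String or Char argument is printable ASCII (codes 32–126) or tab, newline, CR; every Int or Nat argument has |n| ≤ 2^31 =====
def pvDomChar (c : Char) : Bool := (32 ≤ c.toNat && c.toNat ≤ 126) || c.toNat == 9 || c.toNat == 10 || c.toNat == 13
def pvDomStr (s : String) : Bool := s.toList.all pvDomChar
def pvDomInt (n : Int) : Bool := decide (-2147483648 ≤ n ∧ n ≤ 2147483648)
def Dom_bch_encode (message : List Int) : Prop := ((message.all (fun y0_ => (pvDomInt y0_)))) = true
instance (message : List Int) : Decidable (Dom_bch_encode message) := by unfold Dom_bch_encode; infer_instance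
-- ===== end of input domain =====

-- B replaces A's in-place polynomial long division over an extended buffer by an LFSR
-- shift-register encoder (constant 8-cell remainder register); same return value on Pre_
-- (the code's natural domain: exactly 7 information bits).


-- ===== PORT A =====
-- Literal port of A's polynomial division.  All indices are nonnegative, so Python reads/writes
-- are ported with List.getD / List.set; under Pre_ every written index is in range, exactly where
-- Python's msg_ext[i+j] ^= ... succeeds (outside Pre_ A can raise IndexError).  Python's '^' on
-- ints is PySem.Int.bxor (exact, including negatives).
def bch_encode (message : List Int) : List Int :=
  let g : List Int := [1, 1, 1, 0, 1, 0, 0, 0, 1]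
  let msg_ext := message ++ List.replicate 8 (0 : Int)
  let msg_ext := (List.range 7).foldl (fun l i =>
    if l.getD i 0 = 1 then
      (List.range g.length).foldl
        (fun l j => l.set (i + j) (PySem.Int.bxor (l.getD (i + j) 0) (g.getD j 0))) l
    else l) msg_ext
  let parity := PySem.List.slice msg_ext (some 7) (some 15)
  message ++ parity

-- ===== PORT B =====
-- Literal port of Source B: buffer + LFSR shift-register encoder; reg always has 8 cells and
-- ext has at least 8, so Python's reg[0] / ext[i] (i<7) are ported as getD (in range).
def bch_encode_alt (message : List Int) : List Int :=
  let taps : List Int := [1, 1, 0, 1, 0, 0, 0, 1]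
  let ext := message ++ List.replicate 8 (0 : Int)
  let reg : List Int := List.replicate 8 0
  let reg := (List.range 7).foldl (fun reg i =>
    let feedback := PySem.Int.bxor (ext.getD i 0) (reg.getD 0 0)
    let reg := reg.drop 1 ++ [0]
    if feedback = 1 then List.zipWith PySem.Int.bxor reg taps else reg) reg
  message ++ List.zipWith PySem.Int.bxor (PySem.List.slice ext (some 7) (some 15)) reg

-- ===== PRECONDITION & SPEC =====
-- Pre_ excludes messages shorter than the 7 information bits BCH(15,7) expects that contain a
-- literal 1: on those the division can XOR past the end of msg_ext and raise IndexError
-- (content-dependently; e.g. [1] raises, [1,0,0,0] completes).  Short messages with no 1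
-- never fire the XOR and are kept.
def Pre_bch_encode (message : List Int) : Prop :=
  7 ≤ message.length ∨ (1 : Int) ∉ message
instance (message : List Int) : Decidable (Pre_bch_encode message) := by
  unfold Pre_bch_encode; infer_instance
def pvWitness_bch_encode : List Int := [1, 0, 1, 1, 0, 0, 1]

def Spec_bch_encode (message : List Int) (out : List Int) : Prop := out = bch_encode_alt message
instance (message : List Int) (out : List Int) : Decidable (Spec_bch_encode message out) := by
  unfold Spec_bch_encode; infer_instance

-- ===== CLAIM (what is proved, stated in full; the proofs are below) =====
def Claim_equal_bch_encode : Prop := ∀ (message : List Int), Dom_bch_encode message →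
  Pre_bch_encode message → Spec_bch_encode message (bch_encode message)

-- ===== LEMMAS AND PROOFS =====

-- proof-side names for the data of the two ports
def pvBase (m : List Int) : List Int := m ++ List.replicate 8 (0 : Int)
def pvG : List Int := [1, 1, 1, 0, 1, 0, 0, 0, 1]
def pvStepA (i : Nat) (l : List Int) : List Int :=
  if l.getD i 0 = 1 then
    (List.range pvG.length).foldl
      (fun l j => l.set (i + j) (PySem.Int.bxor (l.getD (i + j) 0) (pvG.getD j 0))) l
  else l
def pvStepB (m : List Int) (i : Nat) (r : List Int) : List Int :=
  let b := PySem.Int.bxor ((pvBase m).getD i 0) (r.getD 0 0)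
  let r := r.drop 1 ++ [0]
  if b = 1 then List.zipWith PySem.Int.bxor r [1, 1, 0, 1, 0, 0, 0, 1] else r

lemma pvUnfoldA (m : List Int) : bch_encode m =
    m ++ PySem.List.slice ((List.range 7).foldl (fun l i => pvStepA i l) (pvBase m))
      (some 7) (some 15) := rfl

-- B's fold over the message elements, rewritten as a fold over the index range
lemma pvUnfoldB (m : List Int) : bch_encode_alt m =
    m ++ List.zipWith PySem.Int.bxor (PySem.List.slice (pvBase m) (some 7) (some 15))
      ((List.range 7).foldl (fun r i => pvStepB m i r) (List.replicate 8 0)) := rfl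

-- the loop invariant: the tail of A's buffer is the tail of the untouched base, the next 8
-- positions XOR-ed with B's register; register cells are bits
def pvInv (m : List Int) (i : Nat) (l r : List Int) : Prop :=
  l.drop i = List.zipWith PySem.Int.bxor (((pvBase m).drop i).take 8) r ++ (pvBase m).drop (i + 8)
  ∧ r.length = 8 ∧ ∀ x ∈ r, x = 0 ∨ x = 1

lemma pvBase_getD (m : List Int) (i : Nat) :
    (pvBase m).getD i 0 = if i < m.length then m.getD i 0 else 0 := by
  unfold pvBase
  rcases lt_or_ge i m.length with h | h
  · simp [List.getD, List.getElem?_append_left h, h]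
  · rw [if_neg (by omega)]
    simp only [List.getD, List.getElem?_append_right h, List.getElem?_replicate]
    split <;> rfl

lemma pvGetD_drop (l : List Int) (i j : Nat) : l.getD (i + j) 0 = (l.drop i).getD j 0 := by
  simp [List.getD, List.getElem?_drop]

lemma pvInner_drop (js : List Nat) (i : Nat) (l : List Int) :
    ((js.foldl (fun l j => l.set (i + j) (PySem.Int.bxor (l.getD (i + j) 0) (pvG.getD j 0))) l).drop i)
    = js.foldl (fun d j => d.set j (PySem.Int.bxor (d.getD j 0) (pvG.getD j 0))) (l.drop i) := by
  induction js generalizing l with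
  | nil => rfl
  | cons j js ih =>
      simp only [List.foldl_cons]
      rw [ih, pvGetD_drop l i j, List.set_drop]

lemma pvZip_zeros (xs : List Int) (n : Nat) (h : xs.length ≤ n) :
    List.zipWith PySem.Int.bxor xs (List.replicate n 0) = xs := by
  induction xs generalizing n with
  | nil => simp
  | cons x xs ih =>
      cases n with
      | zero => simp at h
      | succ n => simp [List.replicate_succ, ih n (by simpa using h)]

lemma pvBxor_cancel (a b : Int) : PySem.Int.bxor (PySem.Int.bxor a b) b = a := by
  rcases lt_or_ge a 0 with ha | ha <;> rcases lt_or_ge b 0 with hb | hb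
  · -- a < 0, b < 0
    have hinner : PySem.Int.bxor a b = (((-a - 1).toNat ^^^ (-b - 1).toNat : Nat) : Int) := by
      unfold PySem.Int.bxor
      rw [if_neg (by omega), if_neg (by omega)]
    rw [hinner]
    unfold PySem.Int.bxor
    rw [if_pos (by positivity), if_neg (by omega), Int.toNat_natCast, Nat.xor_xor_cancel_right]
    omega
  · -- a < 0, 0 ≤ b
    have hinner : PySem.Int.bxor a b = -((((-a - 1).toNat ^^^ b.toNat : Nat)) : Int) - 1 := by
      unfold PySem.Int.bxor
      rw [if_neg (by omega), if_pos (by omega)]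
    rw [hinner]
    unfold PySem.Int.bxor
    rw [if_neg (by omega), if_pos (by omega)]
    have hts : (-(-((((-a - 1).toNat ^^^ b.toNat : Nat)) : Int) - 1) - 1).toNat
        = (-a - 1).toNat ^^^ b.toNat := by omega
    rw [hts, Nat.xor_xor_cancel_right]
    omega
  · -- 0 ≤ a, b < 0
    have hinner : PySem.Int.bxor a b = -(((a.toNat ^^^ (-b - 1).toNat : Nat)) : Int) - 1 := by
      unfold PySem.Int.bxor
      rw [if_pos (by omega), if_neg (by omega)]
    rw [hinner]
    unfold PySem.Int.bxor
    rw [if_neg (by omega), if_neg (by omega)]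
    have hts : (-(-(((a.toNat ^^^ (-b - 1).toNat : Nat)) : Int) - 1) - 1).toNat
        = a.toNat ^^^ (-b - 1).toNat := by omega
    rw [hts, Nat.xor_xor_cancel_right]
    omega
  · -- 0 ≤ a, 0 ≤ b
    have hinner : PySem.Int.bxor a b = ((a.toNat ^^^ b.toNat : Nat) : Int) := by
      unfold PySem.Int.bxor
      rw [if_pos (by omega), if_pos (by omega)]
    rw [hinner]
    unfold PySem.Int.bxor
    rw [if_pos (by positivity), if_pos (by omega), Int.toNat_natCast, Nat.xor_xor_cancel_right]
    omega

lemma pvAssoc01 (b r t : Int) (hr : r = 0 ∨ r = 1) (ht : t = 0 ∨ t = 1) :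
    PySem.Int.bxor (PySem.Int.bxor b r) t = PySem.Int.bxor b (PySem.Int.bxor r t) := by
  rcases hr with rfl | rfl <;> rcases ht with rfl | rfl
  · rw [show PySem.Int.bxor (0:Int) 0 = 0 by decide, PySem.Int.bxor_zero, PySem.Int.bxor_zero]
  · rw [show PySem.Int.bxor (0:Int) 1 = 1 by decide, PySem.Int.bxor_zero]
  · rw [show PySem.Int.bxor (1:Int) 0 = 1 by decide, PySem.Int.bxor_zero]
  · rw [show PySem.Int.bxor (1:Int) 1 = 0 by decide, PySem.Int.bxor_zero, pvBxor_cancel]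

lemma pvBxor01 (r t : Int) (hr : r = 0 ∨ r = 1) (ht : t = 0 ∨ t = 1) :
    PySem.Int.bxor r t = 0 ∨ PySem.Int.bxor r t = 1 := by
  rcases hr with rfl | rfl <;> rcases ht with rfl | rfl <;> norm_num [PySem.Int.bxor]

lemma pvLen8 (r : List Int) (h : r.length = 8) :
    ∃ r0 r1 r2 r3 r4 r5 r6 r7, r = [r0, r1, r2, r3, r4, r5, r6, r7] := by
  match r with
  | [r0, r1, r2, r3, r4, r5, r6, r7] => exact ⟨_, _, _, _, _, _, _, _, rfl⟩
  | [] | [_] | [_,_] | [_,_,_] | [_,_,_,_] | [_,_,_,_,_] | [_,_,_,_,_,_] | [_,_,_,_,_,_,_] =>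
      simp at h
  | _::_::_::_::_::_::_::_::_::_ => simp at h

lemma pvLen9 (d : List Int) (h : 9 ≤ d.length) :
    ∃ b0 b1 b2 b3 b4 b5 b6 b7 b8 t, d = b0::b1::b2::b3::b4::b5::b6::b7::b8::t := by
  match d with
  | b0::b1::b2::b3::b4::b5::b6::b7::b8::t => exact ⟨_, _, _, _, _, _, _, _, _, _, rfl⟩
  | [] | [_] | [_,_] | [_,_,_] | [_,_,_,_] | [_,_,_,_,_] | [_,_,_,_,_,_] | [_,_,_,_,_,_,_]
  | [_,_,_,_,_,_,_,_] => simp at h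

lemma pvStep (m : List Int) (i : Nat) (hi : i < 7) (hm : 7 ≤ m.length) (l r : List Int)
    (h : pvInv m i l r) : pvInv m (i + 1) (pvStepA i l) (pvStepB m i r) := by
  obtain ⟨hdrop, hlen, h01⟩ := h
  obtain ⟨r0, r1, r2, r3, r4, r5, r6, r7, rfl⟩ := pvLen8 r hlen
  have hr0 := h01 r0 (by simp); have hr1 := h01 r1 (by simp); have hr2 := h01 r2 (by simp)
  have hr3 := h01 r3 (by simp); have hr4 := h01 r4 (by simp); have hr5 := h01 r5 (by simp)
  have hr6 := h01 r6 (by simp); have hr7 := h01 r7 (by simp)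
  have hd9 : 9 ≤ ((pvBase m).drop i).length := by simp [pvBase]; omega
  obtain ⟨b0, b1, b2, b3, b4, b5, b6, b7, b8, t, hd⟩ := pvLen9 _ hd9
  have ht8 : (pvBase m).drop (i + 8) = b8 :: t := by rw [← List.drop_drop, hd]; rfl
  have ht9 : (pvBase m).drop (i + 1 + 8) = t := by
    rw [show i + 1 + 8 = i + 9 by omega, ← List.drop_drop, hd]; rfl
  have htake0 : ((pvBase m).drop i).take 8 = [b0, b1, b2, b3, b4, b5, b6, b7] := by
    rw [hd]; rfl
  have htake1 : ((pvBase m).drop (i + 1)).take 8 = [b1, b2, b3, b4, b5, b6, b7, b8] := by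
    rw [← List.drop_drop, hd]; rfl
  have hdropE : l.drop i = (PySem.Int.bxor b0 r0) :: (PySem.Int.bxor b1 r1) :: (PySem.Int.bxor b2 r2) :: (PySem.Int.bxor b3 r3) :: (PySem.Int.bxor b4 r4) :: (PySem.Int.bxor b5 r5) :: (PySem.Int.bxor b6 r6) :: (PySem.Int.bxor b7 r7) :: b8 :: t := by
    rw [hdrop, htake0, ht8]; rfl
  have hlA : l.getD i 0 = PySem.Int.bxor b0 r0 := by
    have h0 := pvGetD_drop l i 0
    rw [Nat.add_zero] at h0
    rw [h0, hdropE]; rfl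
  have hbB : (pvBase m).getD i 0 = b0 := by
    have h0 := pvGetD_drop (pvBase m) i 0
    rw [Nat.add_zero] at h0
    rw [h0, hd]; rfl
  have hresdrop := pvInner_drop (List.range pvG.length) i l
  simp only [pvStepA, pvStepB, hlA, hbB, List.getD_cons_zero]
  have hshift : [r0, r1, r2, r3, r4, r5, r6, r7].drop 1 ++ [(0:Int)] = [r1, r2, r3, r4, r5, r6, r7, 0] := rfl
  have hreg' : List.zipWith PySem.Int.bxor ([r0, r1, r2, r3, r4, r5, r6, r7].drop 1 ++ [(0:Int)])
      [1, 1, 0, 1, 0, 0, 0, 1] = [(PySem.Int.bxor r1 1), (PySem.Int.bxor r2 1), (PySem.Int.bxor r3 0), (PySem.Int.bxor r4 1), (PySem.Int.bxor r5 0), (PySem.Int.bxor r6 0), (PySem.Int.bxor r7 0), (PySem.Int.bxor 0 1)] := rfl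
  have hfold1 : ((List.range pvG.length).foldl
      (fun d j => d.set j (PySem.Int.bxor (d.getD j 0) (pvG.getD j 0)))
      ((PySem.Int.bxor b0 r0) :: (PySem.Int.bxor b1 r1) :: (PySem.Int.bxor b2 r2) :: (PySem.Int.bxor b3 r3) :: (PySem.Int.bxor b4 r4) :: (PySem.Int.bxor b5 r5) :: (PySem.Int.bxor b6 r6) :: (PySem.Int.bxor b7 r7) :: b8 :: t)).drop 1
      = (PySem.Int.bxor (PySem.Int.bxor b1 r1) 1) :: (PySem.Int.bxor (PySem.Int.bxor b2 r2) 1) :: (PySem.Int.bxor (PySem.Int.bxor b3 r3) 0) :: (PySem.Int.bxor (PySem.Int.bxor b4 r4) 1) :: (PySem.Int.bxor (PySem.Int.bxor b5 r5) 0) :: (PySem.Int.bxor (PySem.Int.bxor b6 r6) 0) :: (PySem.Int.bxor (PySem.Int.bxor b7 r7) 0) :: (PySem.Int.bxor b8 1) :: t := rfl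
  have hzip1 : List.zipWith PySem.Int.bxor [b1, b2, b3, b4, b5, b6, b7, b8] [(PySem.Int.bxor r1 1), (PySem.Int.bxor r2 1), (PySem.Int.bxor r3 0), (PySem.Int.bxor r4 1), (PySem.Int.bxor r5 0), (PySem.Int.bxor r6 0), (PySem.Int.bxor r7 0), (PySem.Int.bxor 0 1)]
      = [(PySem.Int.bxor b1 (PySem.Int.bxor r1 1)), (PySem.Int.bxor b2 (PySem.Int.bxor r2 1)), (PySem.Int.bxor b3 (PySem.Int.bxor r3 0)), (PySem.Int.bxor b4 (PySem.Int.bxor r4 1)), (PySem.Int.bxor b5 (PySem.Int.bxor r5 0)), (PySem.Int.bxor b6 (PySem.Int.bxor r6 0)), (PySem.Int.bxor b7 (PySem.Int.bxor r7 0)), (PySem.Int.bxor b8 (PySem.Int.bxor 0 1))] := rfl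
  have hzip2 : List.zipWith PySem.Int.bxor [b1, b2, b3, b4, b5, b6, b7, b8] [r1, r2, r3, r4, r5, r6, r7, 0]
      = [(PySem.Int.bxor b1 r1), (PySem.Int.bxor b2 r2), (PySem.Int.bxor b3 r3), (PySem.Int.bxor b4 r4), (PySem.Int.bxor b5 r5), (PySem.Int.bxor b6 r6), (PySem.Int.bxor b7 r7), (PySem.Int.bxor b8 0)] := rfl
  unfold pvInv
  refine ⟨?_, ?_, ?_⟩
  · -- the drop part of the invariant
    by_cases hc : PySem.Int.bxor b0 r0 = 1
    · rw [if_pos hc, if_pos hc, ← List.drop_drop, hresdrop, hdropE, hfold1, htake1, hreg', hzip1, ht9]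
      simp only [List.cons_append, List.nil_append, List.cons.injEq]
      refine ⟨?_, ?_, ?_, ?_, ?_, ?_, ?_, ?_⟩
      · exact pvAssoc01 b1 r1 1 hr1 (Or.inr rfl)
      · exact pvAssoc01 b2 r2 1 hr2 (Or.inr rfl)
      · exact pvAssoc01 b3 r3 0 hr3 (Or.inl rfl)
      · exact pvAssoc01 b4 r4 1 hr4 (Or.inr rfl)
      · exact pvAssoc01 b5 r5 0 hr5 (Or.inl rfl)
      · exact pvAssoc01 b6 r6 0 hr6 (Or.inl rfl)
      · exact pvAssoc01 b7 r7 0 hr7 (Or.inl rfl)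
      · have h8 := pvAssoc01 b8 0 1 (Or.inl rfl) (Or.inr rfl)
        rw [PySem.Int.bxor_zero] at h8
        exact ⟨h8, trivial⟩
    · rw [if_neg hc, if_neg hc, ← List.drop_drop, hdropE, hshift, htake1, hzip2, ht9]
      have hdrop1 : ((PySem.Int.bxor b0 r0) :: (PySem.Int.bxor b1 r1) :: (PySem.Int.bxor b2 r2) :: (PySem.Int.bxor b3 r3) :: (PySem.Int.bxor b4 r4) :: (PySem.Int.bxor b5 r5) :: (PySem.Int.bxor b6 r6) :: (PySem.Int.bxor b7 r7) :: b8 :: t).drop 1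
          = (PySem.Int.bxor b1 r1) :: (PySem.Int.bxor b2 r2) :: (PySem.Int.bxor b3 r3) :: (PySem.Int.bxor b4 r4) :: (PySem.Int.bxor b5 r5) :: (PySem.Int.bxor b6 r6) :: (PySem.Int.bxor b7 r7) :: b8 :: t := rfl
      rw [hdrop1]
      simp only [List.cons_append, List.nil_append, PySem.Int.bxor_zero]
  · -- length of the new register
    split <;> rfl
  · -- bit-ness of the new register
    split
    · intro x hx
      rw [hreg'] at hx
      simp only [List.mem_cons, List.not_mem_nil, or_false] at hx
      rcases hx with rfl | rfl | rfl | rfl | rfl | rfl | rfl | rfl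
      · exact pvBxor01 r1 1 hr1 (Or.inr rfl)
      · exact pvBxor01 r2 1 hr2 (Or.inr rfl)
      · exact pvBxor01 r3 0 hr3 (Or.inl rfl)
      · exact pvBxor01 r4 1 hr4 (Or.inr rfl)
      · exact pvBxor01 r5 0 hr5 (Or.inl rfl)
      · exact pvBxor01 r6 0 hr6 (Or.inl rfl)
      · exact pvBxor01 r7 0 hr7 (Or.inl rfl)
      · exact pvBxor01 0 1 (Or.inl rfl) (Or.inr rfl)
    · intro x hx
      rw [hshift] at hx
      simp only [List.mem_cons, List.not_mem_nil, or_false] at hx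
      rcases hx with rfl | rfl | rfl | rfl | rfl | rfl | rfl | rfl
      · exact hr1
      · exact hr2
      · exact hr3
      · exact hr4
      · exact hr5
      · exact hr6
      · exact hr7
      · exact Or.inl rfl

lemma pvInvBase (m : List Int) (i : Nat) : pvInv m i (pvBase m) (List.replicate 8 0) := by
  refine ⟨?_, by simp, by simp⟩
  rw [pvZip_zeros _ _ (by simp), ← List.drop_drop, List.take_append_drop]

lemma pvInvAll (m : List Int) (hm : 7 ≤ m.length) (n : Nat) (hn : n ≤ 7) :
    pvInv m n ((List.range n).foldl (fun l i => pvStepA i l) (pvBase m))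
      ((List.range n).foldl (fun r i => pvStepB m i r) (List.replicate 8 0)) := by
  induction n with
  | zero => exact pvInvBase m 0
  | succ n ih =>
      rw [List.range_succ, List.foldl_append, List.foldl_append]
      exact pvStep m n (by omega) hm _ _ (ih (by omega))

lemma pvNoOne (m : List Int) (hm : (1 : Int) ∉ m) (n : Nat) :
    ((List.range n).foldl (fun l i => pvStepA i l) (pvBase m)) = pvBase m
    ∧ ((List.range n).foldl (fun r i => pvStepB m i r) (List.replicate 8 0))
        = List.replicate 8 0 := by
  induction n with
  | zero => exact ⟨rfl, rfl⟩
  | succ n ih =>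
      have hne : (if n < m.length then m.getD n 0 else 0) ≠ 1 := by
        split
        · rename_i h
          intro heq
          apply hm
          rw [← heq, List.getD_eq_getElem m 0 h]
          exact List.getElem_mem h
        · norm_num
      rw [List.range_succ, List.foldl_append, List.foldl_append, List.foldl_cons, List.foldl_nil,
        List.foldl_cons, List.foldl_nil, ih.1, ih.2]
      constructor
      · simp only [pvStepA]
        rw [if_neg (by rw [pvBase_getD]; exact hne)]
      · have hrep : List.replicate 8 (0 : Int) = [0, 0, 0, 0, 0, 0, 0, 0] := rfl
        simp only [pvStepB, hrep, List.getD_cons_zero, PySem.Int.bxor_zero]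
        rw [if_neg (by rw [pvBase_getD]; exact hne)]
        rfl

lemma pvFinal (m : List Int) (l r : List Int) (h : pvInv m 7 l r) :
    m ++ PySem.List.slice l (some 7) (some 15)
    = m ++ List.zipWith PySem.Int.bxor (PySem.List.slice (pvBase m) (some 7) (some 15)) r := by
  obtain ⟨hdrop, hlen, _⟩ := h
  congr 1
  have hsl : ∀ x : List Int, PySem.List.slice x (some 7) (some 15) = (x.drop 7).take 8 := by
    intro x
    rw [PySem.List.slice_toNat x (by norm_num) (by norm_num)]
    rw [show Int.toNat 15 = 15 from rfl, show Int.toNat 7 = 7 from rfl]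
  have hwlen : (((pvBase m).drop 7).take 8).length ≤ 8 := by
    rw [List.length_take]; omega
  have hzlen : (List.zipWith PySem.Int.bxor (((pvBase m).drop 7).take 8) r).length
      = (((pvBase m).drop 7).take 8).length := by
    rw [List.length_zipWith, hlen]; omega
  rw [hsl, hsl, hdrop]
  rcases lt_or_ge m.length 7 with hs | hs
  · have htail : (pvBase m).drop (7 + 8) = [] := by
      apply List.drop_eq_nil_of_le
      simp [pvBase]; omega
    rw [htail, List.append_nil]
    exact List.take_of_length_le (by omega)
  · have h8 : (List.zipWith PySem.Int.bxor (((pvBase m).drop 7).take 8) r).length = 8 := by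
      rw [hzlen, List.length_take, List.length_drop]
      simp [pvBase]
      omega
    exact List.take_left' h8

-- ===== VERDICT (by name: the statement is the Claim_ definition above) =====
theorem bch_encode_spec : Claim_equal_bch_encode := by
  intro m _dom hpre
  unfold Spec_bch_encode
  rw [pvUnfoldA, pvUnfoldB]
  rcases hpre with hm | h1
  · exact pvFinal m _ _ (pvInvAll m hm 7 le_rfl)
  · rcases pvNoOne m h1 7 with ⟨ha, hb⟩
    rw [ha, hb]
    exact pvFinal m _ _ (pvInvBase m 7)
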